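-- pv_equiv track=rewrite | github.com/sandeepgangarapu/bandits | peeking/ucb_peeking.py | split_outcome_lists
-- ===== SOURCE A (Python) =====
-- def split_outcome_lists(group, outcome):
--     # Given group allocation and outcomes, this func gives the outcomes of control and trtments allcoated ito those
--     # groups so fat
--     # Output is a list of list
--     control = [[0]]
--     trt = [[0]]
--     if group[0] == 0:
--         control[0] = [outcome[0]]
--     else:
--         trt[0] = [outcome[0]]
--     for i in range(1, len(group)):
--         if group[i] == 0:
--             control.append(control[-1] + [outcome[i]])
--             trt.append(trt[-1])
--         else:
--             control.append(control[-1])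
--             trt.append(trt[-1] + [outcome[i]])
--     return control, trt
-- ===== SOURCE B (Python) =====
-- def split_outcome_lists(group, outcome):
--     c_sent = [] if group[0] == 0 else [0]
--     t_sent = [0] if group[0] == 0 else []
--     c_full = c_sent + [outcome[j] for j in range(len(group)) if group[j] == 0]
--     t_full = t_sent + [outcome[j] for j in range(len(group)) if group[j] != 0]
--     control, trt = [], []
--     c, t = len(c_sent), len(t_sent)
--     for g in group:
--         if g == 0:
--             c += 1
--         else:
--             t += 1
--         control.append(c_full[:c])
--         trt.append(t_full[:t])
--     return control, trt
-- ===== Notes on version B (the rewrite author's own statement) =====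
-- stated objective: alternative
-- what changed: B first builds the two complete cumulative outcome lists (with the [0] sentinel) in one pass and then emits every snapshot as a prefix slice guided by running counts, instead of A's loop concatenating each new snapshot onto the previous one.
import Mathlib
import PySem

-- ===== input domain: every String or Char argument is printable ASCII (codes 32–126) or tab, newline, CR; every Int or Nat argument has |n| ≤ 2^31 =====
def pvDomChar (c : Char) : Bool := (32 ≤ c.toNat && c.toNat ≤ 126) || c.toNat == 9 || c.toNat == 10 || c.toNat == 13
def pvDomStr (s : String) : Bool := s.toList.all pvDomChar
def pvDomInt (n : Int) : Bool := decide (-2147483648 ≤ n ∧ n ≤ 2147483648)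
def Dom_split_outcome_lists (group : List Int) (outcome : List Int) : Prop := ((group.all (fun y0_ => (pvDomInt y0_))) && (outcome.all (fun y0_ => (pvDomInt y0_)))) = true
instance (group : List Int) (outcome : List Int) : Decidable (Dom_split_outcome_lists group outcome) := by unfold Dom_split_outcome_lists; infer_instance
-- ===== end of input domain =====

-- B builds the two full cumulative lists once and emits each snapshot as a prefix slice,
-- instead of A's concatenation onto the previous snapshot (objective: alternative decomposition).

-- ===== PORT A =====
-- one iteration of A's for-loop (state = (control, trt), index i)
def pvAStep (group : List Int) (outcome : List Int)
    (st : List (List Int) × List (List Int)) (i : Int) : List (List Int) × List (List Int) :=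
  if PySem.List.pyGetD group i 0 = 0 then
    (st.1 ++ [PySem.List.pyGetD st.1 (-1) [] ++ [PySem.List.pyGetD outcome i 0]], st.2 ++ [PySem.List.pyGetD st.2 (-1) []])
  else
    (st.1 ++ [PySem.List.pyGetD st.1 (-1) []], st.2 ++ [PySem.List.pyGetD st.2 (-1) [] ++ [PySem.List.pyGetD outcome i 0]])

def split_outcome_lists (group : List Int) (outcome : List Int) : List (List Int) × List (List Int) :=
  let control : List (List Int) :=
    if PySem.List.pyGetD group 0 0 = 0 then [[PySem.List.pyGetD outcome 0 0]] else [[0]]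
  let trt : List (List Int) :=
    if PySem.List.pyGetD group 0 0 = 0 then [[0]] else [[PySem.List.pyGetD outcome 0 0]]
  (PySem.List.pyRange 1 group.length 1).foldl (pvAStep group outcome) (control, trt)

-- ===== PORT B =====
-- one iteration of B's for-loop (state = (control, trt, c, t), element g)
def pvBStep (c_full : List Int) (t_full : List Int)
    (st : List (List Int) × List (List Int) × Int × Int) (g : Int) :
    List (List Int) × List (List Int) × Int × Int :=
  let c := if g = 0 then st.2.2.1 + 1 else st.2.2.1
  let t := if g = 0 then st.2.2.2 else st.2.2.2 + 1
  (st.1 ++ [PySem.List.slice c_full none (some c)],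
   st.2.1 ++ [PySem.List.slice t_full none (some t)], c, t)

def split_outcome_lists_alt (group : List Int) (outcome : List Int) : List (List Int) × List (List Int) :=
  let c_sent : List Int := if PySem.List.pyGetD group 0 0 = 0 then [] else [0]
  let t_sent : List Int := if PySem.List.pyGetD group 0 0 = 0 then [0] else []
  let c_full := c_sent ++ ((PySem.List.pyRange 0 group.length 1).filter
      (fun j => PySem.List.pyGetD group j 0 == 0)).map (fun j => PySem.List.pyGetD outcome j 0)
  let t_full := t_sent ++ ((PySem.List.pyRange 0 group.length 1).filter
      (fun j => !(PySem.List.pyGetD group j 0 == 0))).map (fun j => PySem.List.pyGetD outcome j 0)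
  let st := group.foldl (pvBStep c_full t_full)
    ([], [], (c_sent.length : Int), (t_sent.length : Int))
  (st.1, st.2.1)

-- ===== PRECONDITION & SPEC =====
-- A raises IndexError when group is empty (group[0]) or when outcome is shorter than group
-- (outcome[i] is read for every i); exactly those inputs are excluded.
def Pre_split_outcome_lists (group : List Int) (outcome : List Int) : Prop :=
  group ≠ [] ∧ group.length ≤ outcome.length
instance (group : List Int) (outcome : List Int) : Decidable (Pre_split_outcome_lists group outcome) := by
  unfold Pre_split_outcome_lists; infer_instance
def pvWitness_split_outcome_lists : List Int × List Int := ([0, 1, 0], [3, 4, 5])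

def Spec_split_outcome_lists (group : List Int) (outcome : List Int) (out : List (List Int) × List (List Int)) : Prop := out = split_outcome_lists_alt group outcome
instance (group : List Int) (outcome : List Int) (out : List (List Int) × List (List Int)) : Decidable (Spec_split_outcome_lists group outcome out) := by unfold Spec_split_outcome_lists; infer_instance

-- ===== CLAIM (what is proved, stated in full; the proofs are below) =====
def Claim_equal_split_outcome_lists : Prop := ∀ (group : List Int) (outcome : List Int), Dom_split_outcome_lists group outcome → Pre_split_outcome_lists group outcome → Spec_split_outcome_lists group outcome (split_outcome_lists group outcome)

-- ===== LEMMAS AND PROOFS =====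

-- snapshot after j elements: sentinel ++ outcomes of the matching indices among the first j
def pvSnap (sent : List Int) (p : Nat → Bool) (f : Nat → Int) (j : Nat) : List Int :=
  sent ++ ((List.range j).filter p).map f

def pvCP (group : List Int) : Nat → Bool := fun k => group.getD k 0 == 0
def pvTP (group : List Int) : Nat → Bool := fun k => !(group.getD k 0 == 0)
def pvF (outcome : List Int) : Nat → Int := fun k => outcome.getD k 0
def pvCSent (group : List Int) : List Int := if group.getD 0 0 = 0 then [] else [0]
def pvTSent (group : List Int) : List Int := if group.getD 0 0 = 0 then [0] else []

theorem pvSnap_succ (sent : List Int) (p : Nat → Bool) (f : Nat → Int) (j : Nat) :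
    pvSnap sent p f (j + 1) = if p j then pvSnap sent p f j ++ [f j] else pvSnap sent p f j := by
  unfold pvSnap
  by_cases h : p j <;> simp [List.range_succ, List.filter_append, h]

theorem pvAfold (group outcome : List Int) (n : Nat) :
    (PySem.List.pyRange 1 (1 + (n : Int)) 1).foldl (pvAStep group outcome)
      ([pvSnap (pvCSent group) (pvCP group) (pvF outcome) 1],
       [pvSnap (pvTSent group) (pvTP group) (pvF outcome) 1])
    = ((List.range (n + 1)).map (fun m => pvSnap (pvCSent group) (pvCP group) (pvF outcome) (m + 1)),
       (List.range (n + 1)).map (fun m => pvSnap (pvTSent group) (pvTP group) (pvF outcome) (m + 1))) := by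
  induction n with
  | zero => simp
  | succ n ih =>
    have h1 : (1 : Int) + ((n + 1 : Nat) : Int) = (1 + (n : Int)) + 1 := by push_cast; ring
    have h2 : (1 : Int) + (n : Int) = ((n + 1 : Nat) : Int) := by push_cast; ring
    rw [h1, PySem.List.pyRange_one_succ_right (by omega), List.foldl_append,
      List.foldl_cons, List.foldl_nil, ih, pvAStep]
    have hg : PySem.List.pyGetD group (1 + (n : Int)) 0 = group.getD (n + 1) 0 := by
      rw [h2, PySem.List.pyGetD_natCast]
    have ho : PySem.List.pyGetD outcome (1 + (n : Int)) 0 = outcome.getD (n + 1) 0 := by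
      rw [h2, PySem.List.pyGetD_natCast]
    simp [hg, ho, pvSnap_succ, pvCP, pvTP, pvF, List.range_succ,
      PySem.List.pyGetD_neg_one_append_singleton]
    by_cases h : group[n + 1]?.getD 0 = 0 <;> simp [h]

theorem pvBfold (group : List Int) (c_full t_full : List Int) (n : Nat) (hn : n ≤ group.length) :
    (group.take n).foldl (pvBStep c_full t_full)
      ([], [], ((pvCSent group).length : Int), ((pvTSent group).length : Int))
    = ((List.range n).map (fun m => PySem.List.slice c_full none
          (some ((pvCSent group).length + (List.range (m + 1)).countP (pvCP group)))),
       (List.range n).map (fun m => PySem.List.slice t_full none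
          (some ((pvTSent group).length + (List.range (m + 1)).countP (pvTP group)))),
       ((pvCSent group).length + (List.range n).countP (pvCP group) : Int),
       ((pvTSent group).length + (List.range n).countP (pvTP group) : Int)) := by
  induction n with
  | zero => simp
  | succ n ih =>
    have hn' : n < group.length := by omega
    have ht : group.take (n + 1) = group.take n ++ [group[n]] := by
      rw [List.take_add_one]; simp [List.getElem?_eq_getElem hn']
    rw [ht, List.foldl_append, ih (by omega), List.foldl_cons, List.foldl_nil, pvBStep]
    by_cases h : group[n] = 0 <;>
      simp [h, List.range_succ, pvCP, pvTP, List.getElem?_eq_getElem hn'] <;>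
      constructor <;> try constructor

theorem pvFilterTake (p : Nat → Bool) (L j : Nat) (hj : j ≤ L) :
    ((List.range L).filter p).take ((List.range j).countP p) = (List.range j).filter p := by
  obtain ⟨m, rfl⟩ : ∃ m, L = j + m := ⟨L - j, by omega⟩
  rw [List.range_add, List.filter_append, List.countP_eq_length_filter, List.take_left]

theorem pvSlice_snap (sent : List Int) (p : Nat → Bool) (f : Nat → Int) (L j : Nat) (hj : j ≤ L) :
    PySem.List.slice (sent ++ ((List.range L).filter p).map f) none
        (some ((sent.length : Int) + ((List.range j).countP p : Int)))
    = pvSnap sent p f j := by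
  have : ((sent.length : Int) + ((List.range j).countP p : Int))
      = ((sent.length + (List.range j).countP p : Nat) : Int) := by push_cast; ring
  rw [this, PySem.List.slice_to_natCast, List.take_append,
      List.take_of_length_le (by omega), Nat.add_sub_cancel_left, ← List.map_take,
      pvFilterTake p L j hj, pvSnap]

theorem pvFullC (group outcome : List Int) :
    ((PySem.List.pyRange 0 group.length 1).filter (fun j => PySem.List.pyGetD group j 0 == 0)).map
      (fun j => PySem.List.pyGetD outcome j 0)
    = ((List.range group.length).filter (pvCP group)).map (pvF outcome) := by
  rw [PySem.List.pyRange_zero_natCast, List.filter_map, List.map_map]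
  simp only [Function.comp_def, PySem.List.pyGetD_natCast]
  rfl

theorem pvFullT (group outcome : List Int) :
    ((PySem.List.pyRange 0 group.length 1).filter (fun j => !(PySem.List.pyGetD group j 0 == 0))).map
      (fun j => PySem.List.pyGetD outcome j 0)
    = ((List.range group.length).filter (pvTP group)).map (pvF outcome) := by
  rw [PySem.List.pyRange_zero_natCast, List.filter_map, List.map_map]
  simp only [Function.comp_def, PySem.List.pyGetD_natCast]
  rfl

-- ===== VERDICT (by name: the statement is the Claim_ definition above) =====
theorem split_outcome_lists_spec : Claim_equal_split_outcome_lists := by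
  intro group outcome _ hpre
  obtain ⟨hne, hlen⟩ := hpre
  have hL : 1 ≤ group.length := List.length_pos_of_ne_nil hne
  unfold Spec_split_outcome_lists split_outcome_lists split_outcome_lists_alt
  simp only [PySem.List.pyGetD_zero, pvFullC, pvFullT]
  have hsentC : (if group.getD 0 0 = 0 then ([] : List Int) else [0]) = pvCSent group := rfl
  have hsentT : (if group.getD 0 0 = 0 then ([0] : List Int) else []) = pvTSent group := rfl
  rw [hsentC, hsentT]
  have hinit : ((if group.getD 0 0 = 0 then [[outcome.getD 0 0]] else ([[0]] : List (List Int))),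
                (if group.getD 0 0 = 0 then [[0]] else ([[outcome.getD 0 0]] : List (List Int))))
      = (([pvSnap (pvCSent group) (pvCP group) (pvF outcome) 1] : List (List Int)),
         ([pvSnap (pvTSent group) (pvTP group) (pvF outcome) 1] : List (List Int))) := by
    by_cases h : group[0]?.getD 0 = 0 <;>
      simp [pvSnap, pvCSent, pvTSent, pvCP, pvTP, pvF, List.range_succ, List.getD, h]
  have hcast : (group.length : Int) = 1 + ((group.length - 1 : Nat) : Int) := by
    rw [Nat.cast_sub hL]; ring
  have hA := pvAfold group outcome (group.length - 1)
  rw [Nat.sub_add_cancel hL] at hA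
  have hB := pvBfold group
    (pvCSent group ++ ((List.range group.length).filter (pvCP group)).map (pvF outcome))
    (pvTSent group ++ ((List.range group.length).filter (pvTP group)).map (pvF outcome))
    group.length le_rfl
  rw [List.take_length] at hB
  rw [hinit] at *
  rw [hcast, hA, hB]
  refine Prod.ext ?_ ?_ <;>
    · simp only []
      refine List.map_congr_left ?_
      intro m hm
      rw [List.mem_range] at hm
      exact (pvSlice_snap _ _ _ group.length (m + 1) (by omega)).symm
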